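-- pv_equiv track=rewrite | github.com/nloginoff/balbes | shared/telegram_app/format_outbound.py | _split_raw_near_middle
-- ===== SOURCE A (Python) =====
-- def _split_raw_near_middle(segment: str) -> int:
--     """Return cut index so segment[:cut] and segment[cut:] are both non-empty when len>=2."""
--     n = len(segment)
--     if n < 2:
--         return n // 2 or 1
--     mid = n // 2
--     span = max(n // 4, 40)
--     lo = max(1, mid - span)
--     hi = min(n - 1, mid + span)
--     for sep in ("\n\n", "\n"):
--         i = segment.rfind(sep, lo, hi + 1)
--         if i != -1:
--             j = i + len(sep)
--             if 0 < j < n: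
--                 return j
--     sp = segment.rfind(" ", lo, hi + 1)
--     if sp != -1:
--         j = sp + 1
--         if 0 < j < n:
--             return j
--     return mid
-- ===== SOURCE B (Python) =====
-- def _split_raw_near_middle(segment: str) -> int:
--     """Return cut index so segment[:cut] and segment[cut:] are both non-empty when len>=2."""
--     n = len(segment)
--     if n < 2:
--         return 1
--     mid = n // 2
--     span = max(n // 4, 40)
--     lo = max(1, mid - span)
--     hi = min(n - 1, mid + span)
--     # One forward pass over the window, remembering the rightmost separator of each kind.
--     last_par = last_nl = last_sp = -1
--     for i in range(lo, hi + 1):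
--         c = segment[i]
--         if c == '\n':
--             last_nl = i
--             if i < hi and segment[i + 1] == '\n':
--                 last_par = i
--         elif c == ' ':
--             last_sp = i
--     if last_par != -1 and last_par + 2 < n:
--         return last_par + 2
--     if last_nl != -1 and last_nl + 1 < n:
--         return last_nl + 1
--     if last_sp != -1 and last_sp + 1 < n:
--         return last_sp + 1
--     return mid
-- ===== Notes on version B (the rewrite author's own statement) =====
-- stated objective: alternative
-- what changed: Replaces the three separate rfind scans (paragraph break, newline, space) with a single forward pass over the search window that remembers the rightmost index of each separator kind, then applies the same priority order.
import Mathlib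
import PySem

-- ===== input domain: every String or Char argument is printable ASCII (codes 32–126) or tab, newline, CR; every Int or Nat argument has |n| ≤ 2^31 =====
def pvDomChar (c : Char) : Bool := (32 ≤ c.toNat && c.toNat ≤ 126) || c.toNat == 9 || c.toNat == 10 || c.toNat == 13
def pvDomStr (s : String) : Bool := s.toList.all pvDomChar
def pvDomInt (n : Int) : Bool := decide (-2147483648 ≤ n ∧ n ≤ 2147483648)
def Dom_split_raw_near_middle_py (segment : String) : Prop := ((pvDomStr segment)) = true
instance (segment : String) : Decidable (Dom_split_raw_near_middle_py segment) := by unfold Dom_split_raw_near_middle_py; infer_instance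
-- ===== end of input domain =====

-- B replaces A's three rfind scans with one forward pass over the window that remembers the
-- rightmost separator of each kind; same priority order, same result.

-- ===== PORT A =====
def split_raw_near_middle_py (segment : String) : Int :=
  let n : Int := PySem.Str.len segment
  if n < 2 then (if PySem.Int.floordiv n 2 = 0 then 1 else PySem.Int.floordiv n 2)
  else
    let mid := PySem.Int.floordiv n 2
    let span := max (PySem.Int.floordiv n 4) 40
    let lo := max 1 (mid - span)
    let hi := min (n - 1) (mid + span)
    -- the two-iteration 'for sep in ("\n\n", "\n")' loop, unrolled
    let i1 := PySem.Str.rfindFrom segment "\n\n" lo (some (hi + 1))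
    if i1 ≠ -1 ∧ 0 < i1 + 2 ∧ i1 + 2 < n then i1 + 2
    else
      let i2 := PySem.Str.rfindFrom segment "\n" lo (some (hi + 1))
      if i2 ≠ -1 ∧ 0 < i2 + 1 ∧ i2 + 1 < n then i2 + 1
      else
        let sp := PySem.Str.rfindFrom segment " " lo (some (hi + 1))
        if sp ≠ -1 ∧ 0 < sp + 1 ∧ sp + 1 < n then sp + 1
        else mid

-- ===== PORT B =====
-- the loop body of B's single pass: update the three 'rightmost separator so far' slots
def bStep (segment : String) (hi : Int) (st : Int × Int × Int) (i : Int) : Int × Int × Int :=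
  match PySem.Str.pyGet? segment i with
  | some c =>
    if c = '\n' then
      (if i < hi ∧ PySem.Str.pyGet? segment (i + 1) = some '\n' then i else st.1, i, st.2.2)
    else if c = ' ' then (st.1, st.2.1, i)
    else st
  | none => st

def split_raw_near_middle_py_alt (segment : String) : Int :=
  let n : Int := PySem.Str.len segment
  if n < 2 then 1
  else
    let mid := PySem.Int.floordiv n 2
    let span := max (PySem.Int.floordiv n 4) 40
    let lo := max 1 (mid - span)
    let hi := min (n - 1) (mid + span)
    let scan := (PySem.List.pyRange lo (hi + 1) 1).foldl (bStep segment hi) (-1, -1, -1)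
    if scan.1 ≠ -1 ∧ scan.1 + 2 < n then scan.1 + 2
    else if scan.2.1 ≠ -1 ∧ scan.2.1 + 1 < n then scan.2.1 + 1
    else if scan.2.2 ≠ -1 ∧ scan.2.2 + 1 < n then scan.2.2 + 1
    else mid

-- ===== PRECONDITION & SPEC =====
def Spec_split_raw_near_middle_py (segment : String) (out : Int) : Prop := out = split_raw_near_middle_py_alt segment
instance (segment : String) (out : Int) : Decidable (Spec_split_raw_near_middle_py segment out) := by unfold Spec_split_raw_near_middle_py; infer_instance

-- ===== CLAIM (what is proved, stated in full; the proofs are below) =====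
def Claim_equal_split_raw_near_middle_py : Prop := ∀ (segment : String), Dom_split_raw_near_middle_py segment → Spec_split_raw_near_middle_py segment (split_raw_near_middle_py segment)

-- ===== LEMMAS AND PROOFS =====

-- "rightmost index i ∈ [lo, lo+d) with P i, else -1", scanning from the top
def lastP (P : Int → Bool) (lo : Int) : Nat → Int
  | 0 => -1
  | d + 1 => if P (lo + d) then lo + d else lastP P lo d

-- the three separator predicates B scans for
def pPar (segment : String) (hi i : Int) : Bool :=
  decide (PySem.Str.pyGet? segment i = some '\n' ∧ i < hi ∧ PySem.Str.pyGet? segment (i + 1) = some '\n')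
def pNl (segment : String) (i : Int) : Bool := decide (PySem.Str.pyGet? segment i = some '\n')
def pSp (segment : String) (i : Int) : Bool := decide (PySem.Str.pyGet? segment i = some ' ')

lemma lastP_succ (P : Int → Bool) (lo : Int) (d : Nat) :
    lastP P lo (d + 1) = if P (lo + d) then lo + d else lastP P lo d := by
  rw [lastP]

lemma lastP_ge (P : Int → Bool) (lo : Int) (d : Nat) (h : lastP P lo d ≠ -1) :
    lo ≤ lastP P lo d := by
  induction d with
  | zero => simp [lastP] at h
  | succ d ih =>
    rw [lastP] at h ⊢
    cases hp : P (lo + (d : Int)) with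
    | true => simp only [if_pos rfl]; push_cast; omega
    | false =>
      rw [if_neg (by simp [hp])] at h
      simp only [Bool.false_eq_true, if_false]
      exact ih h

lemma lastP_congr (P Q : Int → Bool) (lo : Int) (d : Nat)
    (h : ∀ i : Int, lo ≤ i → i < lo + d → P i = Q i) :
    lastP P lo d = lastP Q lo d := by
  induction d with
  | zero => rfl
  | succ d ih =>
    simp only [lastP]
    rw [h (lo + d) (by omega) (by push_cast; omega),
      ih (fun i h1 h2 => h i h1 (by push_cast at h2 ⊢; omega))]

lemma lastP_peel (P : Int → Bool) (lo : Int) (d : Nat) (h : P (lo + d) = false) :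
    lastP P lo (d + 1) = lastP P lo d := by
  simp [lastP, h]

lemma lastP_shift (P : Int → Bool) (lo : Int) (d : Nat) :
    lastP P lo d =
      if lastP (fun j => P (lo + j)) 0 d = -1 then -1
      else lo + lastP (fun j => P (lo + j)) 0 d := by
  induction d with
  | zero => simp [lastP]
  | succ d ih =>
    simp only [lastP]
    cases hp : P (lo + (d : Int)) with
    | true =>
      have h' : P (lo + (0 + (d : Int))) = true := by rw [zero_add]; exact hp
      rw [if_pos h', if_neg (show ¬ ((0:Int) + (d : Int) = -1) by omega)]
      simp
    | false =>
      have h' : ¬ (P (lo + (0 + (d : Int))) = true) := by rw [zero_add]; simp [hp]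
      rw [if_neg h']
      simp only [Bool.false_eq_true, if_false]
      exact ih

lemma bStep_eq (segment : String) (hi a b c i : Int) :
    bStep segment hi (a, b, c) i =
      (if pPar segment hi i then i else a,
       if pNl segment i then i else b,
       if pSp segment i then i else c) := by
  unfold bStep pPar pNl pSp
  rcases hg : PySem.Str.pyGet? segment i with _ | ch
  · simp
  · by_cases hn : ch = '\n'
    · subst hn
      by_cases hp : i < hi ∧ PySem.Str.pyGet? segment (i + 1) = some '\n'
      · simp [hp]
      · simp [hp]
    · by_cases hs : ch = ' '
      · subst hs; simp
      · simp [hn, hs]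

lemma scan_proj (segment : String) (hi : Int) (l : List Int) (a b c : Int) :
    l.foldl (bStep segment hi) (a, b, c)
    = (l.foldl (fun x i => if pPar segment hi i then i else x) a,
       l.foldl (fun x i => if pNl segment i then i else x) b,
       l.foldl (fun x i => if pSp segment i then i else x) c) := by
  induction l generalizing a b c with
  | nil => rfl
  | cons i l ih => rw [List.foldl_cons, bStep_eq, ih]; rfl

lemma foldl_lastP (P : Int → Bool) (lo : Int) (d : Nat) :
    (PySem.List.pyRange lo (lo + d) 1).foldl (fun x i => if P i then i else x) (-1) = lastP P lo d := by
  induction d with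
  | zero => simp [PySem.List.pyRange_one_eq_nil le_rfl, lastP]
  | succ d ih =>
    have h : lo ≤ lo + (d : Int) := by omega
    have e : (lo + ((d : Nat) + 1 : Nat) : Int) = (lo + d) + 1 := by push_cast; ring
    rw [e, PySem.List.pyRange_one_succ_right h, List.foldl_append]
    simp [lastP, ih]

lemma go_eq_lastP (t sub : List Char) (k : Nat) :
    PySem.Chars.rfind.go t sub k = lastP (fun j => sub.isPrefixOf (t.drop j.toNat)) 0 (k + 1) := by
  induction k with
  | zero => simp [PySem.Chars.rfind.go, lastP]
  | succ k ih =>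
    rw [PySem.Chars.rfind.go, lastP_succ, ih]
    rw [show ((0:Int) + ((k + 1 : Nat) : Int)).toNat = k + 1 by omega]
    split
    · omega
    · rfl

lemma isPrefixOf_singleton (a : Char) (l : List Char) :
    [a].isPrefixOf l = decide (l[0]? = some a) := by
  rw [Bool.eq_iff_iff]
  simp only [List.isPrefixOf_iff_prefix, decide_eq_true_eq]
  cases l with
  | nil => simp
  | cons b t =>
    simp only [List.cons_prefix_cons, List.nil_prefix, and_true, List.getElem?_cons_zero,
      Option.some.injEq]
    exact eq_comm

lemma isPrefixOf_pair (a b : Char) (l : List Char) :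
    [a, b].isPrefixOf l = (decide (l[0]? = some a) && decide (l[1]? = some b)) := by
  rw [Bool.eq_iff_iff]
  simp only [List.isPrefixOf_iff_prefix, Bool.and_eq_true, decide_eq_true_eq]
  match l with
  | [] => simp
  | [x] => simp [List.cons_prefix_cons]
  | x :: y :: t =>
    simp only [List.cons_prefix_cons, List.nil_prefix, and_true, List.getElem?_cons_zero,
      List.getElem?_cons_succ, Option.some.injEq]
    constructor
    · rintro ⟨h1, h2⟩; exact ⟨h1.symm, h2.symm⟩
    · rintro ⟨h1, h2⟩; exact ⟨h1.symm, h2.symm⟩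

lemma rfindFrom_eq_lastP (cs sub : List Char) (lo e : Int)
    (h0 : 0 ≤ lo) (hle : lo ≤ e) (he : e ≤ cs.length) :
    PySem.Chars.rfindFrom cs sub lo (some e) =
      lastP (fun i => sub.isPrefixOf ((cs.take e.toNat).drop i.toNat)) lo (e.toNat - lo.toNat + 1) := by
  simp only [PySem.Chars.rfindFrom, PySem.Chars.rfind]
  rw [if_neg (by omega : ¬ ((cs.length : Int) < e)), if_neg (by omega : ¬ (e < 0)),
    if_neg (by omega : ¬ (lo < 0)), if_neg (by omega : ¬ (e < lo))]
  have hlen : (List.drop lo.toNat (List.take e.toNat cs)).length = e.toNat - lo.toNat := by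
    simp [List.length_drop, List.length_take]; omega
  rw [hlen, go_eq_lastP,
    lastP_shift (fun i => sub.isPrefixOf ((cs.take e.toNat).drop i.toNat)) lo (e.toNat - lo.toNat + 1)]
  have hQ : lastP (fun j => sub.isPrefixOf ((List.drop lo.toNat (List.take e.toNat cs)).drop j.toNat)) 0 (e.toNat - lo.toNat + 1)
      = lastP (fun j => (fun i => sub.isPrefixOf ((cs.take e.toNat).drop i.toNat)) (lo + j)) 0 (e.toNat - lo.toNat + 1) := by
    apply lastP_congr
    intro j hj1 hj2
    obtain ⟨k, rfl⟩ : ∃ k : Nat, j = (k : Int) := ⟨j.toNat, by omega⟩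
    simp only [Int.toNat_natCast, List.drop_drop]
    rw [show (lo + (k : Int)).toNat = lo.toNat + k by omega]
  rw [hQ]

lemma find_par (segment : String) (n lo hi : Int)
    (hn : n = segment.toList.length) (h1 : 1 ≤ lo) (hlh : lo ≤ hi) (hhn : hi ≤ n - 1) :
    PySem.Str.rfindFrom segment "\n\n" lo (some (hi + 1)) =
      lastP (pPar segment hi) lo (hi + 1 - lo).toNat := by
  rw [PySem.Str.rfindFrom_eq,
    rfindFrom_eq_lastP segment.toList "\n\n".toList lo (hi + 1) (by omega) (by omega) (by omega),
    show (hi + 1).toNat - lo.toNat = (hi + 1 - lo).toNat by omega, lastP_peel]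
  · apply lastP_congr
    intro i hi1 hi2
    obtain ⟨k, rfl⟩ : ∃ k : Nat, i = (k : Int) := ⟨i.toNat, by omega⟩
    have hk : k < (hi + 1).toNat := by
      have : (k : Int) < lo + ((hi + 1 - lo).toNat : Int) := hi2
      omega
    simp only [Int.toNat_natCast, show "\n\n".toList = ['\n', '\n'] from rfl]
    rw [isPrefixOf_pair, List.getElem?_drop, List.getElem?_drop, Nat.add_zero,
      List.getElem?_take, List.getElem?_take, if_pos hk]
    unfold pPar
    rw [show ((k : Int)) = ((k : Nat) : Int) from rfl, PySem.Str.pyGet?_natCast,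
      show ((k : Int) + 1) = ((k + 1 : Nat) : Int) by push_cast; ring, PySem.Str.pyGet?_natCast]
    by_cases hk2 : k + 1 < (hi + 1).toNat
    · have hkhi : (k : Int) < hi := by omega
      simp [hk2, hkhi]
    · have hkhi : ¬ ((k : Int) < hi) := by omega
      simp [hk2, hkhi]
  · have hE : (lo + ((hi + 1 - lo).toNat : Int)).toNat = (hi + 1).toNat := by omega
    simp only [hE]
    rw [List.drop_eq_nil_of_le (by simp [List.length_take])]
    rfl

lemma find_one (segment : String) (ch : Char) (n lo hi : Int)
    (hn : n = segment.toList.length) (h1 : 1 ≤ lo) (hlh : lo ≤ hi) (hhn : hi ≤ n - 1) :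
    PySem.Chars.rfindFrom segment.toList [ch] lo (some (hi + 1)) =
      lastP (fun i => decide (PySem.Str.pyGet? segment i = some ch)) lo (hi + 1 - lo).toNat := by
  rw [rfindFrom_eq_lastP segment.toList [ch] lo (hi + 1) (by omega) (by omega) (by omega),
    show (hi + 1).toNat - lo.toNat = (hi + 1 - lo).toNat by omega, lastP_peel]
  · apply lastP_congr
    intro i hi1 hi2
    obtain ⟨k, rfl⟩ : ∃ k : Nat, i = (k : Int) := ⟨i.toNat, by omega⟩
    have hk : k < (hi + 1).toNat := by
      have : (k : Int) < lo + ((hi + 1 - lo).toNat : Int) := hi2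
      omega
    simp only [Int.toNat_natCast]
    rw [isPrefixOf_singleton, List.getElem?_drop, Nat.add_zero,
      List.getElem?_take, if_pos hk,
      show ((k : Int)) = ((k : Nat) : Int) from rfl, PySem.Str.pyGet?_natCast]
  · have hE : (lo + ((hi + 1 - lo).toNat : Int)).toNat = (hi + 1).toNat := by omega
    simp only [hE]
    rw [List.drop_eq_nil_of_le (by simp [List.length_take])]
    rfl

lemma find_nl (segment : String) (n lo hi : Int)
    (hn : n = segment.toList.length) (h1 : 1 ≤ lo) (hlh : lo ≤ hi) (hhn : hi ≤ n - 1) :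
    PySem.Str.rfindFrom segment "\n" lo (some (hi + 1)) =
      lastP (pNl segment) lo (hi + 1 - lo).toNat := by
  rw [PySem.Str.rfindFrom_eq]
  exact find_one segment '\n' n lo hi hn h1 hlh hhn

lemma find_sp (segment : String) (n lo hi : Int)
    (hn : n = segment.toList.length) (h1 : 1 ≤ lo) (hlh : lo ≤ hi) (hhn : hi ≤ n - 1) :
    PySem.Str.rfindFrom segment " " lo (some (hi + 1)) =
      lastP (pSp segment) lo (hi + 1 - lo).toNat := by
  rw [PySem.Str.rfindFrom_eq]
  exact find_one segment ' ' n lo hi hn h1 hlh hhn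

lemma core (segment : String) (n mid lo hi : Int)
    (hn : n = segment.toList.length) (h1 : 1 ≤ lo) (hlh : lo ≤ hi) (hhn : hi ≤ n - 1) :
    (let i1 := PySem.Str.rfindFrom segment "\n\n" lo (some (hi + 1))
     if i1 ≠ -1 ∧ 0 < i1 + 2 ∧ i1 + 2 < n then i1 + 2
     else
       let i2 := PySem.Str.rfindFrom segment "\n" lo (some (hi + 1))
       if i2 ≠ -1 ∧ 0 < i2 + 1 ∧ i2 + 1 < n then i2 + 1
       else
         let sp := PySem.Str.rfindFrom segment " " lo (some (hi + 1))
         if sp ≠ -1 ∧ 0 < sp + 1 ∧ sp + 1 < n then sp + 1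
         else mid) =
    (let scan := (PySem.List.pyRange lo (hi + 1) 1).foldl (bStep segment hi) (-1, -1, -1)
     if scan.1 ≠ -1 ∧ scan.1 + 2 < n then scan.1 + 2
     else if scan.2.1 ≠ -1 ∧ scan.2.1 + 1 < n then scan.2.1 + 1
     else if scan.2.2 ≠ -1 ∧ scan.2.2 + 1 < n then scan.2.2 + 1
     else mid) := by
  have hscan : (PySem.List.pyRange lo (hi + 1) 1).foldl (bStep segment hi) (-1, -1, -1)
      = (lastP (pPar segment hi) lo (hi + 1 - lo).toNat,
         lastP (pNl segment) lo (hi + 1 - lo).toNat,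
         lastP (pSp segment) lo (hi + 1 - lo).toNat) := by
    rw [show PySem.List.pyRange lo (hi + 1) 1 = PySem.List.pyRange lo (lo + ((hi + 1 - lo).toNat : Int)) 1
        from by rw [show lo + ((hi + 1 - lo).toNat : Int) = hi + 1 by omega]]
    rw [scan_proj, foldl_lastP, foldl_lastP, foldl_lastP]
  simp only [hscan, find_par segment n lo hi hn h1 hlh hhn, find_nl segment n lo hi hn h1 hlh hhn,
    find_sp segment n lo hi hn h1 hlh hhn]
  have gP := lastP_ge (pPar segment hi) lo (hi + 1 - lo).toNat
  have gN := lastP_ge (pNl segment) lo (hi + 1 - lo).toNat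
  have gS := lastP_ge (pSp segment) lo (hi + 1 - lo).toNat
  have e1 : (lastP (pPar segment hi) lo (hi + 1 - lo).toNat ≠ -1 ∧
      0 < lastP (pPar segment hi) lo (hi + 1 - lo).toNat + 2 ∧
      lastP (pPar segment hi) lo (hi + 1 - lo).toNat + 2 < n) ↔
      (lastP (pPar segment hi) lo (hi + 1 - lo).toNat ≠ -1 ∧
      lastP (pPar segment hi) lo (hi + 1 - lo).toNat + 2 < n) := by
    constructor
    · rintro ⟨h, _, h3⟩; exact ⟨h, h3⟩
    · rintro ⟨h, h3⟩; exact ⟨h, by have := gP h; omega, h3⟩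
  have e2 : (lastP (pNl segment) lo (hi + 1 - lo).toNat ≠ -1 ∧
      0 < lastP (pNl segment) lo (hi + 1 - lo).toNat + 1 ∧
      lastP (pNl segment) lo (hi + 1 - lo).toNat + 1 < n) ↔
      (lastP (pNl segment) lo (hi + 1 - lo).toNat ≠ -1 ∧
      lastP (pNl segment) lo (hi + 1 - lo).toNat + 1 < n) := by
    constructor
    · rintro ⟨h, _, h3⟩; exact ⟨h, h3⟩
    · rintro ⟨h, h3⟩; exact ⟨h, by have := gN h; omega, h3⟩
  have e3 : (lastP (pSp segment) lo (hi + 1 - lo).toNat ≠ -1 ∧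
      0 < lastP (pSp segment) lo (hi + 1 - lo).toNat + 1 ∧
      lastP (pSp segment) lo (hi + 1 - lo).toNat + 1 < n) ↔
      (lastP (pSp segment) lo (hi + 1 - lo).toNat ≠ -1 ∧
      lastP (pSp segment) lo (hi + 1 - lo).toNat + 1 < n) := by
    constructor
    · rintro ⟨h, _, h3⟩; exact ⟨h, h3⟩
    · rintro ⟨h, h3⟩; exact ⟨h, by have := gS h; omega, h3⟩
  simp only [e1, e2, e3]

-- ===== VERDICT (by name: the statement is the Claim_ definition above) =====
theorem split_raw_near_middle_py_spec : Claim_equal_split_raw_near_middle_py := by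
  intro segment _
  unfold Spec_split_raw_near_middle_py
  simp only [split_raw_near_middle_py, split_raw_near_middle_py_alt]
  rw [PySem.Str.len_eq]
  have hN0 : (0 : Int) ≤ (segment.toList.length : Int) := Int.natCast_nonneg _
  by_cases h2 : ((segment.toList.length : Int)) < 2
  · rw [if_pos h2, if_pos h2]
    have hf : PySem.Int.floordiv (segment.toList.length : Int) 2 = 0 := by
      unfold PySem.Int.floordiv
      rw [Int.fdiv_eq_ediv_of_nonneg _ (by omega)]
      omega
    rw [hf]
    norm_num
  · rw [if_neg h2, if_neg h2]
    have hmid : PySem.Int.floordiv (segment.toList.length : Int) 2 = (segment.toList.length : Int) / 2 := by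
      unfold PySem.Int.floordiv
      exact Int.fdiv_eq_ediv_of_nonneg _ (by omega)
    have hs40 : (40 : Int) ≤ max (PySem.Int.floordiv (segment.toList.length : Int) 4) 40 := le_max_right _ _
    have hm1 : 1 ≤ PySem.Int.floordiv (segment.toList.length : Int) 2 := by rw [hmid]; omega
    have hm2 : PySem.Int.floordiv (segment.toList.length : Int) 2 ≤ (segment.toList.length : Int) - 1 := by
      rw [hmid]; omega
    exact core segment (segment.toList.length : Int)
      (PySem.Int.floordiv (segment.toList.length : Int) 2)
      (max 1 (PySem.Int.floordiv (segment.toList.length : Int) 2 - max (PySem.Int.floordiv (segment.toList.length : Int) 4) 40))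
      (min ((segment.toList.length : Int) - 1) (PySem.Int.floordiv (segment.toList.length : Int) 2 + max (PySem.Int.floordiv (segment.toList.length : Int) 4) 40))
      rfl (le_max_left _ _)
      (max_le (le_min (by omega) (by omega)) (le_min (by omega) (by omega)))
      (min_le_left _ _)
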